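-- pv_equiv track=rewrite | github.com/MarcoCarry97/UniUpo-Projects | Bachelor/First year/First Semester/Programming 1/Practise/esercizi python.py | estrai_parole
-- ===== SOURCE A (Python) =====
-- def estrai_parole(stringa):
--     # converti stringa in minuscolo e mettila in una lista
--     lista = [stringa.lower()]
--     # spezza la stringa secondo gli spazi e simboli punteggiatura
--     for sep in "' .,;:?!\"\n":
--       tmp = []
--       for s in lista:
--         tmp += s.split(sep)
--       lista = tmp
--     # elimina le parole troppo corte
--     return [s for s in lista if len(s)>3]
-- ===== SOURCE B (Python) =====
-- def estrai_parole(stringa):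
--     seps = "' .,;:?!\"\n"
--     out = []
--     word = []
--     for ch in stringa.lower():
--         if ch in seps:
--             if len(word) > 3:
--                 out.append(''.join(word))
--             word = []
--         else:
--             word.append(ch)
--     if len(word) > 3:
--         out.append(''.join(word))
--     return out
-- ===== Notes on version B (the rewrite author's own statement) =====
-- stated objective: simpler
-- what changed: Replaced the nine successive split-and-flatten passes (one per separator character) by a single left-to-right scan of the lowercased string that keeps a current-word buffer and emits words longer than 3 on each separator and at the end.
import Mathlib
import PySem

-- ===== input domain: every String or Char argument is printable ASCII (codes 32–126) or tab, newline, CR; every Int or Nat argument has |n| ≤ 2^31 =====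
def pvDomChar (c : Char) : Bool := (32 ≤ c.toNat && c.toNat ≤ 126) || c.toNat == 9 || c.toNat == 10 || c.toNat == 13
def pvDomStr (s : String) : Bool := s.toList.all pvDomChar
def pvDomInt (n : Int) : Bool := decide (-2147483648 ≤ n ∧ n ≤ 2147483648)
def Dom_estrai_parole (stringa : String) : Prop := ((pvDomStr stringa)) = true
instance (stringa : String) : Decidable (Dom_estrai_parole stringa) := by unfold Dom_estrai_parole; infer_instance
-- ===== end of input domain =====

-- B replaces A's nine split-and-flatten passes by one linear scan with a word buffer (simpler, one pass).

-- ===== PORT A =====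
-- A: lista = [stringa.lower()]; for each separator char, split every piece and flatten; filter len > 3.
def estrai_parole (stringa : String) : List String :=
  let lista : List (List Char) := [PySem.Chars.lower stringa.toList]
  let lista :=
    ("' .,;:?!\"\n".toList).foldl
      (fun lista sep =>
        lista.foldl (fun tmp s => tmp ++ PySem.Chars.splitOn s [sep]) [])
      lista
  (lista.filter (fun s => 3 < s.length)).map String.ofList

-- ===== PORT B =====
-- B: one pass over the lowercased string with a current-word buffer, flushing on separators and at the end.
def estrai_parole_alt (stringa : String) : List String :=
  let seps : List Char := "' .,;:?!\"\n".toList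
  let p :=
    (PySem.Chars.lower stringa.toList).foldl
      (fun (st : List (List Char) × List Char) ch =>
        if ch ∈ seps then
          (if 3 < st.2.length then st.1 ++ [st.2] else st.1, [])
        else
          (st.1, st.2 ++ [ch]))
      ([], [])
  (if 3 < p.2.length then p.1 ++ [p.2] else p.1).map String.ofList

-- ===== PRECONDITION & SPEC =====
def Spec_estrai_parole (stringa : String) (out : List String) : Prop := out = estrai_parole_alt stringa
instance (stringa : String) (out : List String) : Decidable (Spec_estrai_parole stringa out) := by unfold Spec_estrai_parole; infer_instance

-- ===== CLAIM (what is proved, stated in full; the proofs are below) =====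
def Claim_equal_estrai_parole : Prop := ∀ (stringa : String), Dom_estrai_parole stringa → Spec_estrai_parole stringa (estrai_parole stringa)

-- ===== LEMMAS AND PROOFS =====

-- Character-level split on a set of separator chars (proof-side normal form for both programs).
def pvSp (S : List Char) : List Char → List (List Char)
  | [] => [[]]
  | d :: rest => if d ∈ S then [] :: pvSp S rest else (pvSp S rest).modifyHead (d :: ·)

theorem pvSp_ne_nil (S : List Char) (cs : List Char) : pvSp S cs ≠ [] := by
  cases cs with
  | nil => simp [pvSp]
  | cons d rest =>
    simp only [pvSp]
    split
    · simp
    · cases h : pvSp S rest with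
      | nil => exact absurd h (pvSp_ne_nil S rest)
      | cons a t => simp [List.modifyHead]

theorem pvSp_cons_exists (S : List Char) (cs : List Char) :
    ∃ h t, pvSp S cs = h :: t := by
  cases hx : pvSp S cs with
  | nil => exact absurd hx (pvSp_ne_nil S cs)
  | cons a b => exact ⟨a, b, rfl⟩

-- One step of PySem's fuelled split loop, for a single-character separator.
theorem pvGo_step (c : Char) (fuel : Nat) (d : Char) (rest cur : List Char)
    (acc : List (List Char)) :
    PySem.Chars.splitOn.go [c] (fuel + 1) (d :: rest) cur acc =
      if c = d then PySem.Chars.splitOn.go [c] fuel rest [] (cur.reverse :: acc)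
      else PySem.Chars.splitOn.go [c] fuel rest (d :: cur) acc := by
  rw [PySem.Chars.splitOn.go]
  simp only [List.isPrefixOf, List.length_cons, List.drop_succ_cons, Bool.and_true]
  split_ifs with h1 h2 h2 <;> simp_all

-- The fuelled loop, characterised by pvSp (fuel suffices, accumulators explicit).
theorem pvGo_sp (c : Char) (fuel : Nat) (cs cur : List Char) (acc : List (List Char))
    (hf : cs.length < fuel) :
    PySem.Chars.splitOn.go [c] fuel cs cur acc
      = acc.reverse ++ (pvSp [c] cs).modifyHead (cur.reverse ++ ·) := by
  induction fuel generalizing cs cur acc with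
  | zero => omega
  | succ n ih =>
    cases cs with
    | nil =>
      rw [PySem.Chars.splitOn.go]
      all_goals simp [pvSp, List.modifyHead]
    | cons d rest =>
      rw [pvGo_step]
      simp only [List.length_cons] at hf
      by_cases h : c = d
      · rw [if_pos h, ih rest [] _ (by omega)]
        obtain ⟨hh, t, hht⟩ := pvSp_cons_exists [c] rest
        subst h
        simp [pvSp, hht, List.modifyHead]
      · rw [if_neg h, ih rest (d :: cur) acc (by omega)]
        obtain ⟨hh, t, hht⟩ := pvSp_cons_exists [c] rest
        have hd : d ∉ [c] := by simp [Ne.symm h]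
        simp [pvSp, hd, hht, List.modifyHead]

-- Single-char Python split equals the character scan.
theorem pvSplitOn_single (c : Char) (cs : List Char) :
    PySem.Chars.splitOn cs [c] = pvSp [c] cs := by
  rw [PySem.Chars.splitOn, pvGo_sp c (cs.length + 1) cs [] [] (by omega)]
  obtain ⟨hh, t, hht⟩ := pvSp_cons_exists [c] cs
  simp [hht, List.modifyHead]

-- Splitting every piece by one more char composes.
theorem pvSp_cons (c : Char) (S : List Char) (cs : List Char) :
    (pvSp S cs).flatMap (fun p => pvSp [c] p) = pvSp (c :: S) cs := by
  induction cs with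
  | nil => simp [pvSp]
  | cons d rest ih =>
    by_cases hS : d ∈ S
    · simp only [pvSp, if_pos hS, if_pos (List.mem_cons_of_mem c hS), List.flatMap_cons]
      simp [ih]
    · obtain ⟨h, t, ht⟩ := pvSp_cons_exists S rest
      have ihx := ih
      rw [ht] at ihx
      simp only [List.flatMap_cons] at ihx
      by_cases hc : d = c
      · subst hc
        simp only [pvSp, if_neg hS, if_pos List.mem_cons_self, ht, List.modifyHead,
          List.flatMap_cons]
        rw [List.cons_append, ihx]
      · have hcS : d ∉ (c :: S) := by simp [hc, hS]
        have hdc : d ∉ [c] := by simp [hc]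
        simp only [pvSp, if_neg hS, if_neg hcS, ht, List.modifyHead, List.flatMap_cons,
          if_neg hdc]
        rw [← ihx]
        obtain ⟨h2, t2, ht2⟩ := pvSp_cons_exists [c] h
        simp [ht2]

-- A's loop over the separator characters, in normal form.
theorem pvFold_sp (seps : List Char) (S : List Char) (cs : List Char) :
    seps.foldl (fun L c => L.flatMap (fun p => pvSp [c] p)) (pvSp S cs)
      = pvSp (seps.reverse ++ S) cs := by
  induction seps generalizing S with
  | nil => simp
  | cons c rest ih =>
    simp only [List.foldl_cons, pvSp_cons, ih, List.reverse_cons, List.append_assoc,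
      List.singleton_append]

-- pvSp only depends on membership in the separator list.
theorem pvSp_congr (S T : List Char) (h : ∀ d, d ∈ S ↔ d ∈ T) (cs : List Char) :
    pvSp S cs = pvSp T cs := by
  induction cs with
  | nil => rfl
  | cons d rest ih =>
    simp only [pvSp, ih]
    by_cases hd : d ∈ S
    · rw [if_pos hd, if_pos ((h d).1 hd)]
    · rw [if_neg hd, if_neg (fun hx => hd ((h d).2 hx))]

theorem pvSp_nil_seps (cs : List Char) : pvSp [] cs = [cs] := by
  induction cs with
  | nil => rfl
  | cons d rest ih => simp [pvSp, ih, List.modifyHead]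

-- B's final flush (proof-side name for B's trailing if).
def pvFlush (p : List (List Char) × List Char) : List (List Char) :=
  if 3 < p.2.length then p.1 ++ [p.2] else p.1

-- B's scan, characterised by pvSp: the flushed fold is the filtered split.
theorem pvScan_sp (S : List Char) (cs : List Char) (out : List (List Char)) (word : List Char) :
    pvFlush
      (cs.foldl
        (fun (st : List (List Char) × List Char) ch =>
          if ch ∈ S then
            (if 3 < st.2.length then st.1 ++ [st.2] else st.1, [])
          else (st.1, st.2 ++ [ch]))
        (out, word))
      = out ++ ((pvSp S cs).modifyHead (word ++ ·)).filter (fun s => 3 < s.length) := by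
  induction cs generalizing out word with
  | nil =>
    simp only [List.foldl_nil, pvSp, List.modifyHead, List.append_nil, pvFlush]
    by_cases hw : 3 < word.length <;> simp [hw, List.filter]
  | cons ch rest ih =>
    by_cases h : ch ∈ S
    · obtain ⟨hh, t, hht⟩ := pvSp_cons_exists S rest
      simp only [List.foldl_cons, if_pos h]
      rw [ih]
      by_cases hw : 3 < word.length <;>
        simp [pvSp, h, hht, List.modifyHead, List.filter_cons, hw]
    · simp only [List.foldl_cons, if_neg h]
      rw [ih]
      obtain ⟨hh, t, hht⟩ := pvSp_cons_exists S rest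
      simp [pvSp, h, hht, List.modifyHead]

-- ===== VERDICT (by name: the statement is the Claim_ definition above) =====
theorem estrai_parole_spec : Claim_equal_estrai_parole := by
  intro stringa _
  unfold Spec_estrai_parole estrai_parole estrai_parole_alt
  dsimp only
  set cs := PySem.Chars.lower stringa.toList with hcs
  have hA :
      ("' .,;:?!\"\n".toList).foldl
          (fun lista sep =>
            lista.foldl (fun tmp s => tmp ++ PySem.Chars.splitOn s [sep]) [])
          [cs]
        = pvSp ("' .,;:?!\"\n".toList) cs := by
    have hfun :
        (fun (lista : List (List Char)) sep =>
            lista.foldl (fun tmp s => tmp ++ PySem.Chars.splitOn s [sep]) [])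
          = fun L c => L.flatMap (fun p => pvSp [c] p) := by
      funext L c
      rw [PySem.List.foldl_append_eq_flatMap]
      have hs : (fun s => PySem.Chars.splitOn s [c]) = fun p => pvSp [c] p :=
        funext (fun s => pvSplitOn_single c s)
      rw [hs, List.nil_append]
    rw [hfun, show [cs] = pvSp [] cs from (pvSp_nil_seps cs).symm, pvFold_sp]
    exact pvSp_congr _ _ (fun d => by simp; tauto) cs
  rw [hA]
  have hB := pvScan_sp ("' .,;:?!\"\n".toList) cs [] []
  simp only [pvFlush] at hB
  rw [hB]
  cases hx : pvSp ['\'', ' ', '.', ',', ';', ':', '?', '!', '\"', '\n'] cs <;> simp [hx]
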